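-- pv_equiv track=rewrite | github.com/kminzi/python-algorithm | programmers/Solution_Weekly4.py | solution
-- ===== SOURCE A (Python) =====
-- def solution(table, languages, preference):
--     answer = ''
--     maxscore = 0
--
--     for i in table:
--         tmpscore = 0
--         techstacks = i.split()
--         for score, tech in enumerate(techstacks[1:],0):
--             if tech in languages:
--                 tmpscore += preference[languages.index(tech)]*(5-score)
--
--         if tmpscore > maxscore:
--             maxscore = tmpscore
--             answer = techstacks[0]
--         elif tmpscore == maxscore and answer != '':
--             if answer > techstacks[0]: answer = techstacks[0]
--
--     return answer
-- ===== SOURCE B (Python) =====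
-- def solution(table, languages, preference):
--     # stage 1: split every row once into (name, tech list)
--     rows = []
--     for r in table:
--         toks = r.split()
--         if toks:
--             rows.append((toks[0], toks[1:]))
--
--     # stage 2: language -> preference map, first occurrence wins
--     pref = {}
--     for lang, p in zip(languages, preference):
--         if lang not in pref:
--             pref[lang] = p
--
--     # stage 3: aggregate each row's positional weights per tech, then join with pref
--     candidates = []
--     for name, tail in rows:
--         weight = {}
--         for i, t in enumerate(tail):
--             weight[t] = weight.get(t, 0) + (5 - i)
--         score = 0
--         for t, w in weight.items():
--             score += pref.get(t, 0) * w
--         candidates.append((-score, name))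
--
--     # stage 4: winner = head of candidates sorted by (-score, name)
--     if not candidates:
--         return ''
--     neg, name = sorted(candidates)[0]
--     return name if neg < 0 else ''
-- ===== Notes on version B (the rewrite author's own statement) =====
-- stated objective: alternative
-- what changed: B is a staged pipeline: it splits all rows once, builds a first-occurrence language-to-preference map, aggregates each row's positional weights per tech into a counter dict and joins that counter with the map (replacing A's per-tech membership scan and index lookup in `languages`), then picks the winner as the head of the candidates sorted by (-score, name) instead of A's running (answer, maxscore) update.
import Mathlib
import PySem

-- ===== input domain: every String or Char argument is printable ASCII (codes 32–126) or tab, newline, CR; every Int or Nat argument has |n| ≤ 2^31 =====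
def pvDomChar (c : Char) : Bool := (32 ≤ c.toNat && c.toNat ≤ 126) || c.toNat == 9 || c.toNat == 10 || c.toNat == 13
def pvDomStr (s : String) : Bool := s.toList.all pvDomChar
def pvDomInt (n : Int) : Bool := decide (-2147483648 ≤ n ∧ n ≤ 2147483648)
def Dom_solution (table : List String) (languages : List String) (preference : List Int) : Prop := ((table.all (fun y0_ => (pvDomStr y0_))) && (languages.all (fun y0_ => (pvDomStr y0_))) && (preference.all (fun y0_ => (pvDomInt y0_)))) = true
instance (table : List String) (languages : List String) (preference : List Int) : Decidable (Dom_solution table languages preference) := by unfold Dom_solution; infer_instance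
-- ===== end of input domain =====

-- B inverts A's scoring loops (it iterates the distinct language/preference pairs and sums
-- each language's positional weight in the row, instead of looking each tech up in
-- `languages`), stages the computation in three passes (split rows, dedup language pairs,
-- score), and selects the winner from the sorted candidate list instead of a running best;
-- objective: alternative decomposition.

-- ===== PORT A =====
-- A-side helper: the inner `for score, tech in enumerate(techstacks[1:],0)` loop
def rowScoreA (languages : List String) (preference : List Int) (tail : List String) : Int :=
  (PySem.List.enumerate tail 0).foldl
    (fun tmpscore p =>
      if languages.contains p.2 then
        tmpscore + PySem.List.pyGetD preference (((PySem.List.index? languages p.2).getD 0 : Nat) : Int) 0 * (5 - p.1)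
      else tmpscore) 0

-- A-side helper: the body of `for i in table`
def stepA (languages : List String) (preference : List Int) (st : String × Int) (i : String) : String × Int :=
  let techstacks := PySem.Str.split₀ i
  let tmpscore := rowScoreA languages preference (PySem.List.slice techstacks (some 1) none)
  if tmpscore > st.2 then
    (PySem.List.pyGetD techstacks 0 "", tmpscore)
  else if tmpscore = st.2 ∧ st.1 ≠ "" then
    (if PySem.List.pyGetD techstacks 0 "" < st.1 then PySem.List.pyGetD techstacks 0 "" else st.1, st.2)
  else st

def solution (table : List String) (languages : List String) (preference : List Int) : String :=
  (table.foldl (stepA languages preference) ("", 0)).1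

-- ===== PORT B =====
-- B-side helper, stage 1: `toks = r.split(); if toks: rows.append((toks[0], toks[1:]))`
def splitRowsB (table : List String) : List (String × List String) :=
  table.foldl (fun acc r =>
    match PySem.Str.split₀ r with
    | [] => acc
    | name :: rest => acc ++ [(name, rest)]) []

-- B-side helper, stage 2: `if lang not in pref: pref[lang] = p` over zip(languages, preference)
def prefB (languages : List String) (preference : List Int) : PySem.Dict String Int :=
  (languages.zip preference).foldl
    (fun d lp => if PySem.Dict.contains d lp.1 then d else d.insert lp.1 lp.2)
    PySem.Dict.empty

-- B-side helper: `weight[t] = weight.get(t, 0) + (5 - i)` over enumerate(tail)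
def weightB (tail : List String) : PySem.Dict String Int :=
  (PySem.List.enumerate tail 0).foldl
    (fun d p => d.insert p.2 (d.getD p.2 0 + (5 - p.1))) PySem.Dict.empty

-- B-side helper: `score += pref.get(t, 0) * w` over weight.items()
def rowScoreB (pref : PySem.Dict String Int) (tail : List String) : Int :=
  (weightB tail).items.foldl (fun s tw => s + pref.getD tw.1 0 * tw.2) 0

def solution_alt (table : List String) (languages : List String) (preference : List Int) : String :=
  match PySem.List.sorted2
      ((splitRowsB table).foldl
        (fun acc nt => acc ++ [(-(rowScoreB (prefB languages preference) nt.2), nt.1)]) [])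
      (fun c => c.1) (fun c => c.2) with
  | [] => ""
  | c :: _ => if c.1 < 0 then c.2 else ""

-- ===== PRECONDITION & SPEC =====
-- Pre_ excludes exactly the inputs on which A raises IndexError: a tech listed in some table
-- row that occurs in `languages` at a position beyond the end of `preference`.
def Pre_solution (table : List String) (languages : List String) (preference : List Int) : Prop :=
  ∀ row ∈ table, ∀ t ∈ (PySem.Str.split₀ row).tail,
    ((PySem.List.index? languages t).all (fun j => decide (j < preference.length))) = true
instance (table : List String) (languages : List String) (preference : List Int) : Decidable (Pre_solution table languages preference) := by unfold Pre_solution; infer_instance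

def pvWitness_solution : List String × List String × List Int :=
  (["amy python java", "bob cpp", "cat python"], ["python", "cpp"], [4, 3])

def Spec_solution (table : List String) (languages : List String) (preference : List Int) (out : String) : Prop := out = solution_alt table languages preference
instance (table : List String) (languages : List String) (preference : List Int) (out : String) : Decidable (Spec_solution table languages preference out) := by unfold Spec_solution; infer_instance

-- ===== CLAIM (what is proved, stated in full; the proofs are below) =====
def Claim_equal_solution : Prop := ∀ (table : List String) (languages : List String) (preference : List Int), Dom_solution table languages preference → Pre_solution table languages preference → Spec_solution table languages preference (solution table languages preference)

-- ===== LEMMAS AND PROOFS =====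

-- Python's first-minimum of (Int, String) tuples: the abstract meeting point of A's
-- running best and B's sorted-list head
def tupMin (b c : Int × String) : Int × String :=
  if c.1 < b.1 ∨ (c.1 = b.1 ∧ c.2 < b.2) then c else b

-- A's accumulated (answer, maxscore) state read off a candidate list
def outB (C : List (Int × String)) : String × Int :=
  match C with
  | [] => ("", 0)
  | c :: cs =>
    let b := cs.foldl tupMin c
    if 0 < -b.1 then (b.2, -b.1) else ("", 0)

theorem outB_nil : outB [] = ("", 0) := rfl

theorem outB_cons (c : Int × String) (cs : List (Int × String)) :
    outB (c :: cs) = if 0 < -(cs.foldl tupMin c).1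
      then ((cs.foldl tupMin c).2, -(cs.foldl tupMin c).1) else ("", 0) := rfl

theorem foldl_tupMin_mem (cs : List (Int × String)) (c : Int × String) :
    cs.foldl tupMin c ∈ c :: cs := by
  induction cs generalizing c with
  | nil => simp
  | cons c' cs ih =>
    have h := ih (tupMin c c')
    have : tupMin c c' = c' ∨ tupMin c c' = c := by
      unfold tupMin; split_ifs <;> simp
    rcases this with h2 | h2 <;> rw [h2] at h <;>
      simp only [List.foldl_cons, h2, List.mem_cons] at * <;> tauto

-- ---- stage 2 bridge: the preference dict looks up like zip(languages, preference) ----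

theorem get?_none_of_contains_false (d : PySem.Dict String Int) (k : String)
    (hc : d.contains k = false) : d.get? k = none := by
  have h : ∀ p ∈ d.items, ¬ (p.1 == k) = true := by
    simpa [PySem.Dict.contains, List.any_eq_false] using hc
  simp [PySem.Dict.get?, List.find?_eq_none.2 h]

theorem get?_isSome_of_contains (d : PySem.Dict String Int) (k : String)
    (hc : d.contains k = true) : (d.get? k).isSome = true := by
  have h : ∃ p ∈ d.items, (p.1 == k) = true := by
    simpa [PySem.Dict.contains, List.any_eq_true] using hc
  simp [PySem.Dict.get?, Option.isSome_map, List.find?_isSome.2 h]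

theorem prefB_fold_get? (zs : List (String × Int)) (d : PySem.Dict String Int) (t : String) :
    ((zs.foldl (fun d lp => if PySem.Dict.contains d lp.1 then d else d.insert lp.1 lp.2) d).get? t)
      = (d.get? t).or (Option.map Prod.snd (zs.find? (fun lp => lp.1 == t))) := by
  induction zs generalizing d with
  | nil => simp
  | cons z zs ih =>
    obtain ⟨k, v⟩ := z
    simp only [List.foldl_cons]
    by_cases hc : PySem.Dict.contains d k = true
    · rw [if_pos hc, ih d]
      by_cases hkt : k = t
      · subst hkt
        obtain ⟨y, hy⟩ := Option.isSome_iff_exists.1 (get?_isSome_of_contains d k hc)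
        rw [hy, List.find?_cons_of_pos (by simp)]
        simp
      · rw [List.find?_cons_of_neg (by simpa using hkt)]
    · rw [if_neg hc, ih]
      by_cases hkt : k = t
      · subst hkt
        rw [PySem.Dict.get?_insert_self,
          get?_none_of_contains_false d k (by simpa using hc),
          List.find?_cons_of_pos (by simp)]
        simp
      · rw [PySem.Dict.get?_insert_of_ne d v (show t ≠ k from fun he => hkt he.symm),
          List.find?_cons_of_neg (by simpa using hkt)]

-- the first zip entry for a present key, at a position Pre_ guarantees
theorem find?_zip_of_index? (languages : List String) (preference : List Int) (t : String)
    (j : Nat) (hj : PySem.List.index? languages t = some j) (hlen : j < preference.length) :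
    ∃ (h : j < preference.length),
      (languages.zip preference).find? (fun lp => lp.1 == t) = some (t, preference[j]) := by
  induction languages generalizing preference j with
  | nil => simp [PySem.List.index?] at hj
  | cons l ls ih =>
    cases preference with
    | nil => simp at hlen
    | cons p ps =>
      by_cases h : l = t
      · subst h
        rw [PySem.List.index?_cons_self] at hj
        obtain rfl : j = 0 := by simpa using hj.symm
        exact ⟨hlen, by simp⟩
      · rw [PySem.List.index?_cons_of_ne _ h] at hj
        obtain ⟨j', hj', rfl⟩ : ∃ j', PySem.List.index? ls t = some j' ∧ j' + 1 = j := by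
          cases hx : PySem.List.index? ls t with
          | none =>
            rw [hx] at hj
            simp at hj
          | some a =>
            rw [hx] at hj
            exact ⟨a, rfl, (by simpa using hj.symm : j = a + 1).symm⟩
        have hlen' : j' < ps.length := by simpa using hlen
        obtain ⟨h', hfind⟩ := ih ps j' hj' hlen'
        refine ⟨hlen, ?_⟩
        have hne : ((l, p).1 == t) = false := by simpa using h
        simpa [List.zip_cons_cons, List.find?_cons, hne] using hfind

theorem find?_zip_of_not_mem (languages : List String) (preference : List Int) (t : String)
    (h : t ∉ languages) :
    (languages.zip preference).find? (fun lp => lp.1 == t) = none := by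
  rw [List.find?_eq_none]
  rintro ⟨l, p⟩ hmem
  have := (List.of_mem_zip hmem).1
  simp only [beq_iff_eq]
  exact fun he => h (he ▸ this)

-- the dict lookup agrees with A's membership-test-plus-index lookup
theorem prefB_getD (languages : List String) (preference : List Int) (t : String)
    (hpre : t ∈ languages → (PySem.List.index? languages t).getD 0 < preference.length) :
    (prefB languages preference).getD t 0
      = (if languages.contains t then
          PySem.List.pyGetD preference (((PySem.List.index? languages t).getD 0 : Nat) : Int) 0
        else 0) := by
  rw [PySem.Dict.getD_eq_get?_getD]
  unfold prefB
  rw [prefB_fold_get?]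
  by_cases hmem : t ∈ languages
  · obtain ⟨j, hj⟩ := Option.isSome_iff_exists.1
      ((PySem.List.index?_isSome_iff languages t).2 hmem)
    have hlen : j < preference.length := by have := hpre hmem; rwa [hj] at this
    obtain ⟨_, hf⟩ := find?_zip_of_index? languages preference t j hj hlen
    rw [hf]
    rw [PySem.List.index?_eq_idxOf?] at hj
    simp [PySem.Dict.empty, PySem.Dict.get?, hmem, hj, PySem.List.pyGetD_natCast,
      List.getD_eq_getElem?_getD, List.getElem?_eq_getElem hlen]
  · rw [find?_zip_of_not_mem languages preference t hmem]
    simp [PySem.Dict.empty, PySem.Dict.get?, hmem]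

-- ---- the counter dict: its weighted item sum is the row's weighted tech sum ----

theorem replace_sum (f : String → Int) (l : List (String × Int)) (k : String) (v : Int)
    (hnd : (l.map Prod.fst).Nodup) (v0 : String × Int)
    (hf : l.find? (fun p => p.1 == k) = some v0) :
    ((l.map (fun p => if p.1 == k then (k, v) else p)).map (fun tw => f tw.1 * tw.2)).sum
      = (l.map (fun tw => f tw.1 * tw.2)).sum - f k * v0.2 + f k * v := by
  induction l with
  | nil => simp at hf
  | cons h lTail ih =>
    rw [List.map_cons, List.nodup_cons] at hnd
    by_cases hk : h.1 = k
    · have hpred : (h.1 == k) = true := by simpa using hk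
      rw [@List.find?_cons_of_pos _ (fun p => p.1 == k) h lTail hpred] at hf
      obtain rfl : v0 = h := by simpa using hf.symm
      have htail : lTail.map (fun p => if p.1 == k then (k, v) else p) = lTail := by
        conv_rhs => rw [← List.map_id lTail]
        refine List.map_congr_left ?_
        intro p hp
        have hpk : p.1 ≠ k := by
          intro he
          exact hnd.1 (by rw [hk, ← he]; exact List.mem_map_of_mem hp)
        simp [hpk]
      simp only [List.map_cons, List.sum_cons, hpred, if_pos, htail]
      rw [hk]
      ring
    · have hpred : ¬ (h.1 == k) = true := by simpa using hk
      rw [@List.find?_cons_of_neg _ (fun p => p.1 == k) h lTail hpred] at hf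
      simp only [List.map_cons, List.sum_cons, if_neg hpred]
      rw [ih hnd.2 hf]
      ring

theorem insert_items_of_contains (d : PySem.Dict String Int) (k : String) (v : Int)
    (hc : d.contains k = true) :
    (d.insert k v).items = d.items.map (fun p => if p.1 == k then (k, v) else p) := by
  simp [PySem.Dict.insert, hc]

theorem insert_items_of_not_contains (d : PySem.Dict String Int) (k : String) (v : Int)
    (hc : d.contains k = false) :
    (d.insert k v).items = d.items ++ [(k, v)] := by
  simp [PySem.Dict.insert, hc]

theorem insert_sum (f : String → Int) (d : PySem.Dict String Int)
    (hnd : (d.items.map Prod.fst).Nodup) (k : String) (x : Int) :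
    ((d.insert k (d.getD k 0 + x)).items.map (fun tw => f tw.1 * tw.2)).sum
      = (d.items.map (fun tw => f tw.1 * tw.2)).sum + f k * x := by
  by_cases hc : d.contains k = true
  · obtain ⟨v0, hf⟩ : ∃ v0, d.items.find? (fun p => p.1 == k) = some v0 := by
      refine Option.isSome_iff_exists.1 (List.find?_isSome.2 ?_)
      simpa [PySem.Dict.contains, List.any_eq_true] using hc
    have hg : d.getD k 0 = v0.2 := by
      simp [PySem.Dict.getD, PySem.Dict.get?, hf]
    rw [insert_items_of_contains d k _ hc, replace_sum f d.items k _ hnd v0 hf, hg]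
    ring
  · have hg : d.getD k 0 = 0 := by
      rw [PySem.Dict.getD_eq_get?_getD,
        get?_none_of_contains_false d k (by simpa using hc)]
      rfl
    rw [insert_items_of_not_contains d k _ (by simpa using hc)]
    rw [hg]
    simp [List.map_append]

theorem insert_nodup (d : PySem.Dict String Int)
    (hnd : (d.items.map Prod.fst).Nodup) (k : String) (v : Int) :
    ((d.insert k v).items.map Prod.fst).Nodup := by
  by_cases hc : d.contains k = true
  · rw [insert_items_of_contains d k v hc]
    have heq : (d.items.map (fun p => if p.1 == k then (k, v) else p)).map Prod.fst
        = d.items.map Prod.fst := by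
      rw [List.map_map]
      refine List.map_congr_left ?_
      intro p _
      by_cases hp : p.1 = k <;> simp [hp]
    rw [heq]
    exact hnd
  · have hk : k ∉ d.items.map Prod.fst := by
      intro hmem
      obtain ⟨p, hp, hfst⟩ := List.mem_map.1 hmem
      have hcf : d.items.any (fun p => p.1 == k) = false := by
        unfold PySem.Dict.contains at hc
        simp only [Bool.not_eq_true] at hc
        exact hc
      rw [List.any_eq_false] at hcf
      exact hcf p hp (by simp [hfst])
    rw [insert_items_of_not_contains d k v (by simpa using hc), List.map_append]
    exact List.Nodup.append hnd (by simp) (by simpa using hk)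

theorem weight_fold_sum (f : String → Int) (e : List (Int × String)) :
    ∀ (d : PySem.Dict String Int), (d.items.map Prod.fst).Nodup →
    (((e.foldl (fun d p => d.insert p.2 (d.getD p.2 0 + (5 - p.1))) d).items.map
        (fun tw => f tw.1 * tw.2)).sum)
      = (d.items.map (fun tw => f tw.1 * tw.2)).sum
        + (e.map (fun p => f p.2 * (5 - p.1))).sum := by
  induction e with
  | nil => intro d _; simp
  | cons p e ih =>
    intro d hnd
    simp only [List.foldl_cons, List.map_cons, List.sum_cons]
    rw [ih _ (insert_nodup d hnd _ _), insert_sum f d hnd p.2 (5 - p.1)]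
    ring

-- ---- the per-row scores agree ----
theorem rowScore_eq (languages : List String) (preference : List Int) (rest : List String)
    (hpre : ∀ t ∈ rest, t ∈ languages → (PySem.List.index? languages t).getD 0 < preference.length) :
    rowScoreA languages preference rest = rowScoreB (prefB languages preference) rest := by
  unfold rowScoreA rowScoreB weightB
  rw [PySem.List.foldl_congr_mem _ _
    (fun s p => s + (if languages.contains p.2 then
      PySem.List.pyGetD preference (((PySem.List.index? languages p.2).getD 0 : Nat) : Int) 0 * (5 - p.1)
      else 0)) _ (by intro acc p _; by_cases h : p.2 ∈ languages <;> simp [h])]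
  rw [PySem.List.foldl_add, PySem.List.foldl_add]
  rw [weight_fold_sum (fun t => (prefB languages preference).getD t 0)
    (PySem.List.enumerate rest 0) PySem.Dict.empty (by simp [PySem.Dict.empty])]
  simp only [zero_add, PySem.Dict.empty, List.map_nil, List.sum_nil]
  refine congrArg _ (List.map_congr_left ?_)
  intro p hp
  have hp2 : p.2 ∈ rest := by
    obtain ⟨k, hk, rfl⟩ := (PySem.List.mem_enumerate_iff rest 0 p).1 hp
    exact List.getElem_mem hk
  rw [prefB_getD languages preference p.2 (hpre p.2 hp2)]
  split_ifs <;> ring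

-- ---- A's whole loop produces outB of the candidate list ----

theorem outB_cases (C : List (Int × String)) (hC : ∀ p ∈ C, p.2 ≠ "") :
    outB C = ("", 0) ∨ (0 < (outB C).2 ∧ (outB C).1 ≠ "") := by
  cases C with
  | nil => left; rfl
  | cons c cs =>
    unfold outB
    dsimp only
    by_cases h : 0 < -(cs.foldl tupMin c).1
    · rw [if_pos h]
      exact Or.inr ⟨h, hC _ (foldl_tupMin_mem cs c)⟩
    · rw [if_neg h]
      exact Or.inl rfl

theorem go_ne_nil : ∀ (s cur acc : _), (∀ t ∈ acc, t ≠ ([] : List Char)) →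
    ∀ t ∈ PySem.Chars.split₀.go s cur acc, t ≠ [] := by
  intro s
  induction s with
  | nil =>
    intro cur acc hacc t ht
    unfold PySem.Chars.split₀.go at ht
    split_ifs at ht with h
    · exact hacc t (by simpa using ht)
    · simp only [List.mem_reverse, List.mem_cons] at ht
      rcases ht with rfl | ht
      · simpa [List.isEmpty_iff] using fun he => h (by simp [he])
      · exact hacc t ht
  | cons c rest ih =>
    intro cur acc hacc t ht
    unfold PySem.Chars.split₀.go at ht
    split_ifs at ht with h1 h2
    · exact ih [] acc hacc t ht
    · refine ih [] (cur.reverse :: acc) ?_ t ht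
      intro u hu
      rcases List.mem_cons.1 hu with rfl | hu
      · simpa [List.isEmpty_iff] using fun he => h2 (by simp [he])
      · exact hacc u hu
    · exact ih (c :: cur) acc hacc t ht

theorem split₀_names_ne_nil (s : String) : ∀ t ∈ PySem.Str.split₀ s, t ≠ "" := by
  intro t ht
  unfold PySem.Str.split₀ at ht
  obtain ⟨l, hl, rfl⟩ := List.mem_map.1 ht
  have hne := go_ne_nil s.toList [] [] (by simp) l (by simpa [PySem.Chars.split₀] using hl)
  intro he
  apply hne
  have h2 : (String.ofList l).toList = l := by simp
  rw [he] at h2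
  simpa using h2.symm

-- A's state after one more row is outB of the candidates including that row
theorem stepA_outB (languages : List String) (preference : List Int) (row : String)
    (C : List (Int × String)) (hC : ∀ p ∈ C, p.2 ≠ "")
    (hrow : ∀ t ∈ (PySem.Str.split₀ row).drop 1,
      t ∈ languages → (PySem.List.index? languages t).getD 0 < preference.length) :
    stepA languages preference (outB C) row
      = outB (match PySem.Str.split₀ row with
              | [] => C
              | name :: rest => C ++ [(-(rowScoreB (prefB languages preference) rest), name)]) := by
  have hslice : ∀ (xs : List String), PySem.List.slice xs (some 1) none = xs.drop 1 :=
    fun xs => PySem.List.slice_from xs (by norm_num)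
  cases hsplit : PySem.Str.split₀ row with
  | nil =>
    unfold stepA
    simp only [hsplit, hslice, List.drop_nil]
    have h0 : rowScoreA languages preference [] = 0 := by
      simp [rowScoreA, PySem.List.enumerate_nil]
    rw [h0]
    rcases outB_cases C hC with h | ⟨h1, h2⟩
    · rw [h]
      norm_num
    · rw [if_neg (by omega), if_neg (by rintro ⟨he, -⟩; omega)]
  | cons name rest =>
    have hs : rowScoreA languages preference rest
        = rowScoreB (prefB languages preference) rest := by
      refine rowScore_eq _ _ _ (fun t ht => hrow t ?_)
      rw [hsplit]; exact ht
    unfold stepA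
    simp only [hsplit, hslice, List.drop_succ_cons, List.drop_zero, hs,
      PySem.List.pyGetD_zero_cons]
    set s := rowScoreB (prefB languages preference) rest with hsdef
    cases C with
    | nil =>
      rw [List.nil_append, outB_nil, outB_cons]
      dsimp only [List.foldl_nil]
      by_cases hpos : 0 < s
      · rw [if_pos (by omega : s > (0:Int)), if_pos (by omega : (0:Int) < - -s), neg_neg]
      · rw [if_neg (by omega : ¬ s > (0:Int)), if_neg (by simp), if_neg (by omega)]
    | cons c cs =>
      have hb2 : (cs.foldl tupMin c).2 ≠ "" := hC _ (foldl_tupMin_mem cs c)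
      rw [List.cons_append, outB_cons, outB_cons, List.foldl_append]
      simp only [List.foldl_cons, List.foldl_nil]
      set b := cs.foldl tupMin c with hb
      have ht : tupMin b (-s, name) = if -s < b.1 ∨ (-s = b.1 ∧ name < b.2) then (-s, name) else b := by
        simp [tupMin]
      rw [ht]
      by_cases h1 : 0 < -b.1
      · rw [if_pos h1]
        dsimp only
        by_cases h2 : -s < b.1
        · rw [if_pos (show s > -b.1 by omega), if_pos (Or.inl h2)]
          dsimp only
          rw [if_pos (show (0:Int) < - -s by omega), neg_neg]
        · by_cases h3 : s = -b.1
          · rw [if_neg (show ¬ s > -b.1 by omega), if_pos ⟨h3, hb2⟩]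
            by_cases h4 : name < b.2
            · rw [if_pos h4, if_pos (Or.inr ⟨by omega, h4⟩)]
              dsimp only
              rw [if_pos (show (0:Int) < - -s by omega), neg_neg]
              exact Prod.ext rfl (by omega)
            · rw [if_neg h4,
                if_neg (show ¬(-s < b.1 ∨ (-s = b.1 ∧ name < b.2)) by
                  rintro (hx | ⟨-, hx⟩)
                  · omega
                  · exact h4 hx),
                if_pos h1]
          · rw [if_neg (show ¬ s > -b.1 by omega),
              if_neg (show ¬(s = -b.1 ∧ b.2 ≠ "") from fun hx => h3 hx.1),
              if_neg (show ¬(-s < b.1 ∨ (-s = b.1 ∧ name < b.2)) by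
                rintro (hx | ⟨hx, -⟩) <;> omega),
              if_pos h1]
      · rw [if_neg h1]
        dsimp only
        by_cases hpos : 0 < s
        · rw [if_pos (show s > (0:Int) by omega), if_pos (Or.inl (show -s < b.1 by omega))]
          dsimp only
          rw [if_pos (show (0:Int) < - -s by omega), neg_neg]
        · rw [if_neg (show ¬ s > (0:Int) by omega),
            if_neg (show ¬(s = (0:Int) ∧ ("":String) ≠ "") by simp)]
          by_cases hx : -s < b.1 ∨ (-s = b.1 ∧ name < b.2)
          · rw [if_pos hx]
            dsimp only
            rw [if_neg (show ¬(0:Int) < - -s by omega)]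
          · rw [if_neg hx, if_neg h1]

-- A's whole fold is outB of the whole candidate list
theorem foldl_stepA_outB (languages : List String) (preference : List Int)
    (table : List String) (C : List (Int × String)) (hC : ∀ p ∈ C, p.2 ≠ "")
    (hPre : ∀ row ∈ table, ∀ t ∈ (PySem.Str.split₀ row).drop 1,
      t ∈ languages → (PySem.List.index? languages t).getD 0 < preference.length) :
    table.foldl (stepA languages preference) (outB C)
      = outB (table.foldl (fun acc row =>
          match PySem.Str.split₀ row with
          | [] => acc
          | name :: rest => acc ++ [(-(rowScoreB (prefB languages preference) rest), name)]) C) := by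
  induction table generalizing C with
  | nil => rfl
  | cons row rows ih =>
    simp only [List.foldl_cons]
    rw [stepA_outB languages preference row C hC (hPre row (List.mem_cons_self))]
    have hC' : ∀ p ∈ (match PySem.Str.split₀ row with
        | [] => C
        | name :: rest => C ++ [(-(rowScoreB (prefB languages preference) rest), name)]),
        p.2 ≠ "" := by
      cases hsplit : PySem.Str.split₀ row with
      | nil => exact hC
      | cons name rest =>
        intro p hp
        rcases List.mem_append.1 hp with hp | hp
        · exact hC p hp
        · obtain rfl : p = (-(rowScoreB (prefB languages preference) rest), name) := by
            simpa using hp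
          exact split₀_names_ne_nil row name (hsplit ▸ List.mem_cons_self)
    rw [ih _ hC' (fun r hr => hPre r (List.mem_cons_of_mem _ hr))]

-- ---- B's staged candidate construction equals A's direct one ----

theorem splitRowsB_eq (table : List String) :
    splitRowsB table = table.flatMap (fun row =>
      match PySem.Str.split₀ row with
      | [] => []
      | name :: rest => [(name, rest)]) := by
  unfold splitRowsB
  rw [PySem.List.foldl_congr_mem _ _
    (fun acc r => acc ++ (match PySem.Str.split₀ r with
      | [] => []
      | name :: rest => [(name, rest)])) _
    (by intro acc r _; cases h : PySem.Str.split₀ r <;> simp [h])]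
  rw [PySem.List.foldl_append_eq_flatMap]
  simp

theorem cands_eq (languages : List String) (preference : List Int) (table : List String) :
    (splitRowsB table).foldl
      (fun acc nt => acc ++ [(-(rowScoreB (prefB languages preference) nt.2), nt.1)]) []
    = table.foldl (fun acc row =>
        match PySem.Str.split₀ row with
        | [] => acc
        | name :: rest => acc ++ [(-(rowScoreB (prefB languages preference) rest), name)]) [] := by
  rw [PySem.List.foldl_append_singleton_eq_map, List.nil_append, splitRowsB_eq,
    List.map_flatMap]
  rw [PySem.List.foldl_congr_mem _ _
    (fun acc row => acc ++ (match PySem.Str.split₀ row with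
      | [] => []
      | name :: rest => [(-(rowScoreB (prefB languages preference) rest), name)])) _
    (by intro acc r _; cases h : PySem.Str.split₀ r <;> simp [h])]
  rw [PySem.List.foldl_append_eq_flatMap, List.nil_append]
  congr 1
  funext row
  cases PySem.Str.split₀ row <;> simp

-- ---- B's sorted-list head equals the running tuple minimum ----

-- Python's tuple `<` on (Int, String) as sorted2's strict comparison
def beforeB (a b : Int × String) : Bool :=
  decide (a.1 < b.1) || (!decide (b.1 < a.1) && decide (a.2 < b.2))

theorem insertBy_cons (x y : Int × String) (ys : List (Int × String)) :
    PySem.List.insertBy beforeB x (y :: ys)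
      = if beforeB x y then x :: y :: ys else y :: PySem.List.insertBy beforeB x ys := rfl

theorem beforeB_iff (x y : Int × String) :
    beforeB x y = true ↔ (x.1 < y.1 ∨ (x.1 = y.1 ∧ x.2 < y.2)) := by
  unfold beforeB
  constructor
  · intro h
    rcases Bool.or_eq_true_iff.1 h with h | h
    · exact Or.inl (of_decide_eq_true h)
    · rcases Bool.and_eq_true_iff.1 h with ⟨h1, h2⟩
      have h1' : ¬ y.1 < x.1 := by simpa using h1
      have h2' := of_decide_eq_true h2
      by_cases he : x.1 = y.1
      · exact Or.inr ⟨he, h2'⟩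
      · exact Or.inl (by omega)
  · rintro (h | ⟨h1, h2⟩)
    · exact Bool.or_eq_true_iff.2 (Or.inl (decide_eq_true h))
    · exact Bool.or_eq_true_iff.2 (Or.inr (Bool.and_eq_true_iff.2
        ⟨by simp [show ¬ y.1 < x.1 by omega], decide_eq_true h2⟩))

theorem foldl_insertBy_head (xs : List (Int × String)) :
    ∀ (c : Int × String) (acc : List (Int × String)),
      ∃ t, xs.foldl (fun acc x => PySem.List.insertBy beforeB x acc) (c :: acc)
        = (xs.foldl tupMin c) :: t := by
  induction xs with
  | nil => exact fun c acc => ⟨acc, rfl⟩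
  | cons x xs ih =>
    intro c acc
    simp only [List.foldl_cons]
    rw [insertBy_cons]
    by_cases h : x.1 < c.1 ∨ (x.1 = c.1 ∧ x.2 < c.2)
    · rw [if_pos ((beforeB_iff x c).2 h)]
      have : tupMin c x = x := by unfold tupMin; rw [if_pos h]
      rw [this]
      exact ih x (c :: acc)
    · rw [if_neg (by rw [beforeB_iff]; exact h)]
      have : tupMin c x = c := by unfold tupMin; rw [if_neg h]
      rw [this]
      exact ih c (PySem.List.insertBy beforeB x acc)

theorem sorted2_head (c : Int × String) (cs : List (Int × String)) :
    ∃ t, PySem.List.sorted2 (c :: cs) (fun c => c.1) (fun c => c.2)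
      = (cs.foldl tupMin c) :: t := by
  have hdef : PySem.List.sorted2 (c :: cs) (fun c => c.1) (fun c => c.2)
      = cs.foldl (fun acc x => PySem.List.insertBy beforeB x acc) [c] := rfl
  rw [hdef]
  exact foldl_insertBy_head cs c []

-- Pre_ for one tech, in the form the row lemmas use
theorem pre_bridge (languages : List String) (preference : List Int) (t : String)
    (h : ((PySem.List.index? languages t).all (fun j => decide (j < preference.length))) = true) :
    t ∈ languages → (PySem.List.index? languages t).getD 0 < preference.length := by
  intro hmem
  obtain ⟨j, hj⟩ := Option.isSome_iff_exists.1 ((PySem.List.index?_isSome_iff languages t).2 hmem)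
  rw [hj] at h ⊢
  simpa using h

-- ===== VERDICT (by name: the statement is the Claim_ definition above) =====
theorem solution_spec : Claim_equal_solution := by
  intro table languages preference _ hpre0
  have hpre : ∀ row ∈ table, ∀ t ∈ (PySem.Str.split₀ row).drop 1,
      t ∈ languages → (PySem.List.index? languages t).getD 0 < preference.length := by
    intro row hr t ht
    exact pre_bridge languages preference t
      (hpre0 row hr t (by simpa [← List.drop_one] using ht))
  unfold Spec_solution solution solution_alt
  have h := foldl_stepA_outB languages preference table [] (by simp) hpre
  rw [show (("", 0) : String × Int) = outB [] from rfl, h, cands_eq]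
  cases hc : table.foldl (fun acc row =>
      match PySem.Str.split₀ row with
      | [] => acc
      | name :: rest => acc ++ [(-(rowScoreB (prefB languages preference) rest), name)]) [] with
  | nil => rfl
  | cons c cs =>
    obtain ⟨t, ht⟩ := sorted2_head c cs
    rw [ht, outB_cons]
    by_cases h1 : 0 < -(cs.foldl tupMin c).1
    · rw [if_pos h1]
      dsimp only
      rw [if_pos (show (cs.foldl tupMin c).1 < 0 by omega)]
    · rw [if_neg h1]
      dsimp only
      rw [if_neg (show ¬ (cs.foldl tupMin c).1 < 0 by omega)]
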